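-- pv_equiv track=rewrite | github.com/postvakje/oeis-sequences | oeis-sequences/OEISsequences.py | A066411
-- ===== SOURCE A (Python) =====
-- from math import factorial, floor, comb, prod, isqrt
--
-- def partitionpairs(xlist):
--     """generator of all partitions into pairs and at most 1 singleton, returning the sums of the pairs"""
--     if len(xlist) <= 2:
--         yield [sum(xlist)]
--     else:
--         m = len(xlist)
--         for i in range(m - 1):
--             for j in range(i + 1, m):
--                 rem = xlist[:i] + xlist[i + 1 : j] + xlist[j + 1 :]
--                 y = [xlist[i] + xlist[j]]
--                 for d in partitionpairs(rem):
--                     yield y + d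
--
-- def A066411(n):
--     b = tuple(comb(n, k) for k in range(n // 2 + 1))
--     return len(
--         set(
--             (
--                 sum(d[i] * b[i] for i in range(n // 2 + 1))
--                 for d in partitionpairs(list(range(n + 1)))
--             )
--         )
--     )
-- ===== SOURCE B (Python) =====
-- from math import comb
--
-- def A066411(n):
--     # Iterative depth-first worklist instead of A's recursive generator; the
--     # binomial weights are consumed along the way and the weighted total is
--     # accumulated in each state, so no per-partition list is ever built.
--     weights = [comb(n, k) for k in range(n // 2 + 1)]
--     totals = set()
--     stack = [(list(range(n + 1)), weights, 0)]
--     while stack: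
--         xs, ws, acc = stack.pop()
--         if len(xs) <= 2:
--             totals.add(acc + (ws[0] * sum(xs) if ws else 0))
--         else:
--             m = len(xs)
--             w, rest = ws[0], ws[1:]
--             for i in range(m - 1):
--                 for j in range(i + 1, m):
--                     rem = xs[:i] + xs[i + 1:j] + xs[j + 1:]
--                     stack.append((rem, rest, acc + w * (xs[i] + xs[j])))
--     return len(totals)
-- ===== Notes on version B (the rewrite author's own statement) =====
-- stated objective: alternative
-- what changed: A's recursive generator that materialises one pair-sum list per partition and dots it with the binomial weights afterwards is replaced by an explicit worklist (DFS stack) whose states carry the remaining elements, the unconsumed weights and the running weighted total, so no pair-sum lists are ever built.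
import Mathlib
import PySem

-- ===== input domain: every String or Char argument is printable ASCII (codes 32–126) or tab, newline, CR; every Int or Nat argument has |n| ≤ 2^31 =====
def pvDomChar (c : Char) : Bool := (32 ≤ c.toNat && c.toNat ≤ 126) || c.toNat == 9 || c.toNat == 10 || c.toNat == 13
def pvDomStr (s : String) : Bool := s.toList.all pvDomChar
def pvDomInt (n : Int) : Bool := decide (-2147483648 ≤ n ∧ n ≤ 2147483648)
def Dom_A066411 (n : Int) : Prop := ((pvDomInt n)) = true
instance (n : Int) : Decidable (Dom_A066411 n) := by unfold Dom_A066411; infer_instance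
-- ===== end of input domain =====

-- B replaces A's recursive generator of pair-sum lists by an explicit worklist
-- (DFS stack) that consumes the binomial weights on the way down and accumulates
-- the weighted total per state, never materialising a pair-sum list (objective: alternative).

-- ===== PORT A =====

-- math.comb; exact for the calls A makes (0 ≤ k and 0 ≤ n whenever it is evaluated)
def pvComb (n k : Int) : Int := (Nat.choose n.toNat k.toNat : Int)

-- xlist[:i] + xlist[i+1:j] + xlist[j+1:]; exact for the natural indices 0 ≤ i < j < len(xlist)
-- at which both Pythons evaluate it
def pvRem (xs : List Int) (i j : Nat) : List Int :=
  xs.take i ++ (xs.drop (i + 1)).take (j - (i + 1)) ++ xs.drop (j + 1)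

-- termination helper for the ports (cited in decreasing_by)
theorem pvRem_length (xs : List Int) (i j : Nat) (hij : i < j) (hj : j < xs.length) :
    (pvRem xs i j).length + 2 = xs.length := by
  simp [pvRem]
  omega

def partitionpairs (xs : List Int) : List (List Int) :=
  if xs.length ≤ 2 then [[xs.sum]]
  else
    let m := xs.length
    (List.range (m - 1)).attach.flatMap (fun i =>
      (List.range' (i.1 + 1) (m - (i.1 + 1))).attach.flatMap (fun j =>
        (partitionpairs (pvRem xs i.1 j.1)).map (fun d => (xs.getD i.1 0 + xs.getD j.1 0) :: d)))
termination_by xs.length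
decreasing_by
  have hi := i.2
  have hj := j.2
  simp [List.mem_range] at hi
  simp [List.mem_range'_1] at hj
  have := pvRem_length xs i.1 j.1 (by omega) (by omega)
  omega

def A066411 (n : Int) : Int :=
  let b : List Int := (PySem.List.pyRange 0 (PySem.Int.floordiv n 2 + 1) 1).map (fun k => pvComb n k)
  let s : PySem.Set Int := PySem.Set.ofList
    ((partitionpairs (PySem.List.pyRange 0 (n + 1) 1)).map (fun d =>
      ((PySem.List.pyRange 0 (PySem.Int.floordiv n 2 + 1) 1).map (fun i =>
        PySem.List.pyGetD d i 0 * PySem.List.pyGetD b i 0)).sum))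
  PySem.List.len s

-- ===== PORT B =====

-- the states pushed for one popped internal state, in the order Python appends them
def pvChildren (xs ws : List Int) (acc : Int) : List (List Int × List Int × Int) :=
  (List.range (xs.length - 1)).flatMap (fun i =>
    (List.range' (i + 1) (xs.length - (i + 1))).map (fun j =>
      (pvRem xs i j, ws.tail, acc + ws.headD 0 * (xs.getD i 0 + xs.getD j 0))))

-- worklist measure, cited in decreasing_by
def pvMeasure (st : List (List Int × List Int × Int)) : Nat :=
  (st.map (fun s => s.1.length.factorial)).sum

theorem pvChildren_measure (xs ws : List Int) (acc : Int) (h : ¬ xs.length ≤ 2) :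
    pvMeasure (pvChildren xs ws acc) < xs.length.factorial := by
  obtain ⟨k, hk⟩ : ∃ k, xs.length = k + 3 := ⟨xs.length - 3, by omega⟩
  have key : ∀ c ∈ pvChildren xs ws acc, c.1.length.factorial = (k + 1).factorial := by
    intro c hc
    simp only [pvChildren, List.mem_flatMap, List.mem_map, List.mem_range, List.mem_range'_1] at hc
    obtain ⟨i, hi, j, hj, rfl⟩ := hc
    show (pvRem xs i j).length.factorial = _
    have := pvRem_length xs i j (by omega) (by omega)
    congr 1
    omega
  have hrep : (pvChildren xs ws acc).map (fun s => s.1.length.factorial)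
      = List.replicate (pvChildren xs ws acc).length ((k + 1).factorial) := by
    rw [List.eq_replicate_iff]
    refine ⟨by simp, ?_⟩
    intro x hx
    simp only [List.mem_map] at hx
    obtain ⟨c, hc, rfl⟩ := hx
    exact key c hc
  have hlen : (pvChildren xs ws acc).length ≤ (k + 2) * (k + 2) := by
    rw [pvChildren, List.length_flatMap]
    have h1 := List.sum_le_card_nsmul
      ((List.range (xs.length - 1)).map (fun i => ((List.range' (i + 1) (xs.length - (i + 1))).map
        (fun j => (pvRem xs i j, ws.tail, acc + ws.headD 0 * (xs.getD i 0 + xs.getD j 0)))).length))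
      (k + 2) (by
        intro x hx
        simp only [List.mem_map, List.mem_range] at hx
        obtain ⟨i, hi, rfl⟩ := hx
        simp
        omega)
    simp only [smul_eq_mul, List.length_map, List.length_range] at h1 ⊢
    rw [show xs.length - 1 = k + 2 by omega] at h1 ⊢
    exact h1
  have hmono : pvMeasure (pvChildren xs ws acc) ≤ (k + 2) * (k + 2) * (k + 1).factorial := by
    rw [pvMeasure, hrep, List.sum_replicate, smul_eq_mul]
    exact Nat.mul_le_mul_right _ hlen
  have hfac : xs.length.factorial = (k + 3) * ((k + 2) * (k + 1).factorial) := by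
    rw [hk, show k + 3 = (k + 2) + 1 from rfl, Nat.factorial_succ,
      show k + 2 = (k + 1) + 1 from rfl, Nat.factorial_succ]
  rw [hfac]
  have := Nat.factorial_pos (k + 1)
  nlinarith

theorem pvMeasure_append (s t : List (List Int × List Int × Int)) :
    pvMeasure (s ++ t) = pvMeasure s + pvMeasure t := by
  simp [pvMeasure]

theorem pvMeasure_reverse (s : List (List Int × List Int × Int)) :
    pvMeasure s.reverse = pvMeasure s := by
  simp [pvMeasure]

-- the while loop; the Python stack's top is the head (children are pushed reversed,
-- matching list.append order + pop() from the end)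
def pvLoop (stack : List (List Int × List Int × Int)) (totals : PySem.Set Int) : PySem.Set Int :=
  match stack with
  | [] => totals
  | (xs, ws, acc) :: rest =>
    if xs.length ≤ 2 then
      pvLoop rest (PySem.Set.add totals (acc + (match ws with
        | [] => 0
        | w :: _ => w * xs.sum)))
    else
      pvLoop ((pvChildren xs ws acc).reverse ++ rest) totals
termination_by pvMeasure stack
decreasing_by
  · simp [pvMeasure]
    have := Nat.factorial_pos xs.length
    omega
  · rename_i h
    have h1 := pvChildren_measure xs ws acc h
    have h2 := pvMeasure_append (pvChildren xs ws acc).reverse rest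
    have h3 := pvMeasure_reverse (pvChildren xs ws acc)
    simp [pvMeasure] at h1 h2 h3 ⊢
    omega

def A066411_alt (n : Int) : Int :=
  let weights : List Int := (PySem.List.pyRange 0 (PySem.Int.floordiv n 2 + 1) 1).map (fun k => pvComb n k)
  let totals : PySem.Set Int := pvLoop [(PySem.List.pyRange 0 (n + 1) 1, weights, 0)] PySem.Set.empty
  PySem.List.len totals

-- ===== PRECONDITION & SPEC =====
def Spec_A066411 (n : Int) (out : Int) : Prop := out = A066411_alt n
instance (n : Int) (out : Int) : Decidable (Spec_A066411 n out) := by unfold Spec_A066411; infer_instance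

-- ===== CLAIM (what is proved, stated in full; the proofs are below) =====
def Claim_equal_A066411 : Prop := ∀ (n : Int), Dom_A066411 n → Spec_A066411 n (A066411 n)

-- ===== LEMMAS AND PROOFS =====

-- weighted total of a pair-sum list: sum of zipWith (*) (truncating like Python's zip)
def pvWdot (ws d : List Int) : Int := (List.zipWith (fun w x => w * x) ws d).sum

theorem pvWdot_cons (ws : List Int) (y : Int) (d : List Int) :
    pvWdot ws (y :: d) = ws.headD 0 * y + pvWdot ws.tail d := by
  cases ws <;> simp [pvWdot]

theorem pvWdot_single (ws : List Int) (y : Int) :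
    pvWdot ws [y] = ws.headD 0 * y := by
  cases ws <;> simp [pvWdot]

-- membership in the lists produced by A's generator, internal case
theorem mem_partitionpairs_internal (xs : List Int) (h : ¬ xs.length ≤ 2) (d : List Int) :
    d ∈ partitionpairs xs ↔ ∃ i j : Nat, i < xs.length - 1 ∧ i + 1 ≤ j ∧ j < xs.length ∧
      ∃ d' ∈ partitionpairs (pvRem xs i j), d = (xs.getD i 0 + xs.getD j 0) :: d' := by
  rw [partitionpairs]
  simp only [if_neg h, List.mem_flatMap, List.mem_map, List.mem_attach, true_and]
  constructor
  · rintro ⟨⟨i, hi⟩, ⟨⟨j, hj⟩, d', hd', rfl⟩⟩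
    simp only [List.mem_range] at hi
    simp only [List.mem_range'_1] at hj
    exact ⟨i, j, hi, by omega, by omega, d', hd', rfl⟩
  · rintro ⟨i, j, hi, hj1, hj2, d', hd', rfl⟩
    exact ⟨⟨i, by simp [List.mem_range]; omega⟩,
      ⟨⟨j, by simp [List.mem_range'_1]; omega⟩, d', hd', rfl⟩⟩

-- membership in the child states B pushes for one popped internal state
theorem mem_pvChildren (xs ws : List Int) (acc : Int) (s : List Int × List Int × Int) :
    s ∈ pvChildren xs ws acc ↔ ∃ i j : Nat, i < xs.length - 1 ∧ i + 1 ≤ j ∧ j < xs.length ∧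
      s = (pvRem xs i j, ws.tail, acc + ws.headD 0 * (xs.getD i 0 + xs.getD j 0)) := by
  simp only [pvChildren, List.mem_flatMap, List.mem_map, List.mem_range, List.mem_range'_1]
  constructor
  · rintro ⟨i, hi, j, hj, rfl⟩
    exact ⟨i, j, hi, by omega, by omega, rfl⟩
  · rintro ⟨i, j, hi, hj1, hj2, rfl⟩
    exact ⟨i, hi, j, ⟨by omega, by omega⟩, rfl⟩

-- the contributions of the pushed children are exactly the contributions of the popped state
theorem pvChildren_contrib (xs ws : List Int) (acc x : Int) (h : ¬ xs.length ≤ 2) :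
    (∃ s ∈ pvChildren xs ws acc, ∃ d ∈ partitionpairs s.1, x = s.2.2 + pvWdot s.2.1 d)
      ↔ ∃ d ∈ partitionpairs xs, x = acc + pvWdot ws d := by
  constructor
  · rintro ⟨s, hs, d', hd', rfl⟩
    rw [mem_pvChildren] at hs
    obtain ⟨i, j, hi, hj1, hj2, rfl⟩ := hs
    refine ⟨(xs.getD i 0 + xs.getD j 0) :: d', ?_, ?_⟩
    · rw [mem_partitionpairs_internal xs h]
      exact ⟨i, j, hi, hj1, hj2, d', hd', rfl⟩
    · rw [pvWdot_cons]; ring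
  · rintro ⟨d, hd, rfl⟩
    rw [mem_partitionpairs_internal xs h] at hd
    obtain ⟨i, j, hi, hj1, hj2, d', hd', rfl⟩ := hd
    refine ⟨(pvRem xs i j, ws.tail, acc + ws.headD 0 * (xs.getD i 0 + xs.getD j 0)), ?_, d', hd', ?_⟩
    · rw [mem_pvChildren]; exact ⟨i, j, hi, hj1, hj2, rfl⟩
    · rw [pvWdot_cons]; ring

-- loop semantics at the membership level
theorem mem_pvLoop (stack : List (List Int × List Int × Int)) (t : PySem.Set Int) (x : Int) :
    x ∈ pvLoop stack t ↔ x ∈ t ∨ ∃ s ∈ stack, ∃ d ∈ partitionpairs s.1, x = s.2.2 + pvWdot s.2.1 d := by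
  induction stack, t using pvLoop.induct with
  | case1 t => simp [pvLoop]
  | case2 t xs ws acc rest h ih =>
    have hpp : partitionpairs xs = [[xs.sum]] := by rw [partitionpairs]; simp [h]
    rw [pvLoop.eq_def]
    simp only [if_pos h]
    rw [ih]
    rcases ws with _ | ⟨w, ws'⟩ <;>
    · simp only [PySem.Set.mem_add]
      constructor
      · rintro ((hx | hx) | ⟨s, hs, hc⟩)
        · exact Or.inl hx
        · refine Or.inr ⟨_, List.mem_cons_self, [xs.sum], by simp [hpp], ?_⟩
          rw [pvWdot_single]; simpa using hx
        · exact Or.inr ⟨s, List.mem_cons_of_mem _ hs, hc⟩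
      · rintro (hx | ⟨s, hs, hc⟩)
        · exact Or.inl (Or.inl hx)
        · rcases List.mem_cons.mp hs with rfl | hs'
          · obtain ⟨d, hd, hx⟩ := hc
            rw [hpp] at hd
            simp only [List.mem_singleton] at hd
            subst hd
            rw [pvWdot_single] at hx
            refine Or.inl (Or.inr ?_)
            simpa using hx
          · exact Or.inr ⟨s, hs', hc⟩
  | case3 t xs ws acc rest h ih =>
    rw [pvLoop.eq_def]
    simp only [if_neg h]
    rw [ih]
    constructor
    · rintro (hx | ⟨s, hs, hc⟩)
      · exact Or.inl hx
      · rw [List.mem_append, List.mem_reverse] at hs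
        rcases hs with hs | hs
        · exact Or.inr ⟨(xs, ws, acc), List.mem_cons_self,
            (pvChildren_contrib xs ws acc x h).mp ⟨s, hs, hc⟩⟩
        · exact Or.inr ⟨s, List.mem_cons_of_mem _ hs, hc⟩
    · rintro (hx | ⟨s, hs, hc⟩)
      · exact Or.inl hx
      · rcases List.mem_cons.mp hs with rfl | hs'
        · obtain ⟨s', hs', hc'⟩ := (pvChildren_contrib xs ws acc x h).mpr hc
          exact Or.inr ⟨s', by rw [List.mem_append, List.mem_reverse]; exact Or.inl hs', hc'⟩
        · exact Or.inr ⟨s, by rw [List.mem_append]; exact Or.inr hs', hc⟩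

theorem nodup_pvLoop (stack : List (List Int × List Int × Int)) (t : PySem.Set Int)
    (ht : t.Nodup) : (pvLoop stack t).Nodup := by
  revert ht
  induction stack, t using pvLoop.induct with
  | case1 t => intro ht; simpa [pvLoop] using ht
  | case2 t xs ws acc rest h ih =>
    intro ht
    rw [pvLoop.eq_def]
    simp only [if_pos h]
    exact ih (PySem.Set.nodup_add _ _ ht)
  | case3 t xs ws acc rest h ih =>
    intro ht
    rw [pvLoop.eq_def]
    simp only [if_neg h]
    exact ih ht

-- length of every list A's generator yields
theorem partitionpairs_length (xs : List Int) (d : List Int) (hd : d ∈ partitionpairs xs) :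
    d.length = max 1 ((xs.length + 1) / 2) := by
  by_cases h : xs.length ≤ 2
  · rw [partitionpairs] at hd
    simp only [if_pos h, List.mem_singleton] at hd
    subst hd
    simp
    omega
  · rw [mem_partitionpairs_internal xs h] at hd
    obtain ⟨i, j, hi, hj1, hj2, d', hd', rfl⟩ := hd
    have hrem := pvRem_length xs i j (by omega) hj2
    have ih := partitionpairs_length (pvRem xs i j) d' hd'
    simp only [List.length_cons, ih]
    omega
termination_by xs.length
decreasing_by omega

-- A's indexed dot product equals the zip dot product when d is long enough
theorem adot_eq_wdot (b d : List Int) (hlen : b.length ≤ d.length) :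
    ((PySem.List.pyRange 0 (b.length : Int) 1).map (fun i =>
      PySem.List.pyGetD d i 0 * PySem.List.pyGetD b i 0)).sum = pvWdot b d := by
  rw [PySem.List.pyRange_zero_nat]
  rw [List.map_map]
  simp only [Function.comp_def, PySem.List.pyGetD_natCast]
  induction b generalizing d with
  | nil => simp [pvWdot]
  | cons w b' ih =>
    cases d with
    | nil => simp at hlen
    | cons x d' =>
      rw [List.length_cons, List.range_succ_eq_map]
      simp only [List.map_cons, List.map_map, List.sum_cons, Function.comp_def,
        List.getD_cons_zero, List.getD_cons_succ]
      rw [ih d' (by simpa using hlen)]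
      simp [pvWdot]
      ring

-- ===== VERDICT (by name: the statement is the Claim_ definition above) =====
theorem A066411_spec : Claim_equal_A066411 := by
  intro n _
  show A066411 n = A066411_alt n
  rw [A066411, A066411_alt]
  set b : List Int := (PySem.List.pyRange 0 (PySem.Int.floordiv n 2 + 1) 1).map
    (fun k => pvComb n k) with hb
  set xs0 : List Int := PySem.List.pyRange 0 (n + 1) 1 with hxs0
  have hkey : ∀ d ∈ partitionpairs xs0,
      ((PySem.List.pyRange 0 (PySem.Int.floordiv n 2 + 1) 1).map (fun i =>
        PySem.List.pyGetD d i 0 * PySem.List.pyGetD b i 0)).sum = pvWdot b d := by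
    intro d hd
    have hdlen := partitionpairs_length xs0 d hd
    have hxlen : xs0.length = (n + 1).toNat := by
      rw [hxs0, PySem.List.length_pyRange_one]
      omega
    rcases le_or_gt 0 n with hn | hn
    · have hfd : PySem.Int.floordiv n 2 = n / 2 := PySem.Int.floordiv_eq_ediv_of_pos (by omega)
      have hblen : b.length = (n / 2 + 1).toNat := by
        rw [hb, List.length_map, PySem.List.length_pyRange_one]
        omega
      have hcast : ((b.length : Int)) = PySem.Int.floordiv n 2 + 1 := by
        rw [hblen, hfd]; omega
      rw [← hcast]
      exact adot_eq_wdot b d (by rw [hblen]; rw [hdlen, hxlen]; omega)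
    · have hneg : PySem.Int.floordiv n 2 + 1 ≤ 0 := by
        have hfd : PySem.Int.floordiv n 2 = n / 2 := PySem.Int.floordiv_eq_ediv_of_pos (by omega)
        omega
      have hnil : PySem.List.pyRange 0 (PySem.Int.floordiv n 2 + 1) 1 = [] :=
        PySem.List.pyRange_one_eq_nil (by omega)
      rw [hb, hnil]
      simp [pvWdot]
  have memA : ∀ x : Int, x ∈ PySem.Set.ofList ((partitionpairs xs0).map (fun d =>
      ((PySem.List.pyRange 0 (PySem.Int.floordiv n 2 + 1) 1).map (fun i =>
        PySem.List.pyGetD d i 0 * PySem.List.pyGetD b i 0)).sum)) ↔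
      ∃ d ∈ partitionpairs xs0, x = pvWdot b d := by
    intro x
    rw [PySem.Set.mem_ofList, List.mem_map]
    constructor
    · rintro ⟨d, hd, rfl⟩
      exact ⟨d, hd, hkey d hd⟩
    · rintro ⟨d, hd, rfl⟩
      exact ⟨d, hd, hkey d hd⟩
  have memB : ∀ x : Int, x ∈ pvLoop [(xs0, b, 0)] PySem.Set.empty ↔
      ∃ d ∈ partitionpairs xs0, x = pvWdot b d := by
    intro x
    rw [mem_pvLoop]
    simp [PySem.Set.empty]
  have hnodA : (PySem.Set.ofList ((partitionpairs xs0).map (fun d =>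
      ((PySem.List.pyRange 0 (PySem.Int.floordiv n 2 + 1) 1).map (fun i =>
        PySem.List.pyGetD d i 0 * PySem.List.pyGetD b i 0)).sum))).Nodup :=
    PySem.Set.nodup_ofList _
  have hnodB : (pvLoop [(xs0, b, 0)] PySem.Set.empty).Nodup :=
    nodup_pvLoop _ _ (by simp [PySem.Set.empty])
  have hperm := List.Subperm.antisymm
    (hnodA.subperm (fun x hx => (memB x).mpr ((memA x).mp hx)))
    (hnodB.subperm (fun x hx => (memA x).mpr ((memB x).mp hx)))
  simp only [PySem.List.len_eq, hperm.length_eq]
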